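-- pv_equiv track=rewrite | github.com/pypi-data/pypi-mirror-397 | packages/awfl/awfl-0.1.6-py3-none-any.whl/awfl/response_handler/rh_utils.py | _scan_quote_state
-- ===== SOURCE A (Python) =====
-- def _scan_quote_state(s: str) -> tuple[bool, bool]:
--     """Lightweight shell-like scanner to determine if we're left inside a
--     single-quoted or double-quoted context at end of string.
--
--     - Single quotes are literal until the next single quote.
--     - Double quotes can be escaped with backslash outside single quotes.
--     - Backslash escaping is ignored inside single quotes (Bash semantics).
--     Returns (in_single, in_double).
--     """
--     in_single = False
--     in_double = False
--     escape = False
--     for ch in s: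
--         if escape:
--             # Current char is escaped; consume and clear escape.
--             escape = False
--             continue
--         if in_single:
--             if ch == "'":
--                 in_single = False
--             # Backslash is literal in single quotes; no escaping.
--             continue
--         if in_double:
--             if ch == '"':
--                 in_double = False
--                 continue
--             if ch == "\\":
--                 # Only in double or unquoted, backslash can escape next char
--                 escape = True
--                 continue
--             continue
--         # Unquoted context
--         if ch == "'":
--             in_single = True
--             continue
--         if ch == '"':
--             in_double = True
--             continue
--         if ch == "\\":
--             escape = True
--             continue
--     return in_single, in_double
-- ===== SOURCE B (Python) =====
-- def _find_any(s: str, i: int, chars: str) -> int: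
--     """First index >= i whose character is in `chars`, or len(s) if none."""
--     n = len(s)
--     while i < n and s[i] not in chars:
--         i += 1
--     return i
--
--
-- def _scan_quote_state(s: str) -> tuple[bool, bool]:
--     """Segment-jumping scanner: no carried state booleans; each quoting
--     context is a region of the string, skipped in one _find_any jump, and
--     the answer is returned directly at the point the string runs out."""
--     n = len(s)
--     i = 0
--     while True:
--         i = _find_any(s, i, "'\"\\")          # skip plain unquoted text
--         if i >= n:
--             return (False, False)
--         ch = s[i]
--         if ch == "\\":
--             i += 2                            # escaped char: skip both
--         elif ch == "'":
--             j = _find_any(s, i + 1, "'")      # literal until closing '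
--             if j >= n:
--                 return (True, False)
--             i = j + 1
--         else:  # ch == '"'
--             i += 1
--             while True:
--                 j = _find_any(s, i, '"\\')
--                 if j >= n:
--                     return (False, True)
--                 if s[j] == '"':
--                     i = j + 1
--                     break
--                 i = j + 2                     # escaped char inside ""
-- ===== Notes on version B (the rewrite author's own statement) =====
-- stated objective: alternative
-- what changed: Replaced A's single pass carrying three state booleans (in_single, in_double, escape) by a segment-jumping scanner with no state variables at all: a find-next-special helper skips each plain region in one jump, each quoting context is handled by its own block of the control flow, and the answer is returned as a literal at the exact point the string runs out.
import Mathlib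
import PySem

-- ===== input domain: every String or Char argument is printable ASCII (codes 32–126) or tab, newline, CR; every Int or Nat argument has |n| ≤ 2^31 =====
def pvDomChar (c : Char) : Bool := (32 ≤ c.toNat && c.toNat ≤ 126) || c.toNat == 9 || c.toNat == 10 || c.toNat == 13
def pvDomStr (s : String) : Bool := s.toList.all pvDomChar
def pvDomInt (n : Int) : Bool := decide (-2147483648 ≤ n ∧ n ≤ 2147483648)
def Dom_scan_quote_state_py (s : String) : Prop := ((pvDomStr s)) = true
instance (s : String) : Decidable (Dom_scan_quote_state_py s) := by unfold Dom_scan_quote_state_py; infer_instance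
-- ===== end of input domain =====

-- B replaces A's one-pass scanner with three carried state booleans by a
-- segment-jumping scanner with no state variables (objective: alternative).

-- ===== PORT A =====
-- one iteration of A's for-loop over state (in_single, in_double, escape)
def pvStepA (st : Bool × Bool × Bool) (ch : Char) : Bool × Bool × Bool :=
  let (in_single, in_double, escape) := st
  if escape then (in_single, in_double, false)
  else if in_single then
    (if ch = '\'' then (false, in_double, escape) else (in_single, in_double, escape))
  else if in_double then
    (if ch = '"' then (in_single, false, escape)
     else if ch = '\\' then (in_single, in_double, true)
     else (in_single, in_double, escape))
  else
    (if ch = '\'' then (true, in_double, escape)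
     else if ch = '"' then (in_single, true, escape)
     else if ch = '\\' then (in_single, in_double, true)
     else (in_single, in_double, escape))

def scan_quote_state_py (s : String) : Bool × Bool :=
  let st := s.toList.foldl pvStepA (false, false, false)
  (st.1, st.2.1)

-- ===== PORT B =====
-- B's `_find_any(s, i, chars)`: first index ≥ i whose char is in `chars`,
-- or len(s) if none (the index stays a Nat: Python's i here is always ≥ 0).
def pvFindAny (s : List Char) (chars : List Char) (i : Nat) : Nat :=
  if h : i < s.length then
    if s[i] ∈ chars then i else pvFindAny s chars (i + 1)
  else i
termination_by s.length - i

theorem pvFindAny_le (s chars : List Char) (i : Nat) : i ≤ pvFindAny s chars i := by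
  unfold pvFindAny
  split
  · split
    · exact le_refl i
    · exact le_trans (Nat.le_succ i) (pvFindAny_le s chars (i + 1))
  · exact le_refl i
termination_by s.length - i

-- B's two while-loops: the outer unquoted loop and the inner double-quote loop.
mutual
def pvLoopU (s : List Char) (i : Nat) : Bool × Bool :=
  let i' := pvFindAny s ['\'', '"', '\\'] i
  if h : i' < s.length then
    let ch := s[i']
    if ch = '\\' then pvLoopU s (i' + 2)
    else if ch = '\'' then
      let j := pvFindAny s ['\''] (i' + 1)
      if j < s.length then pvLoopU s (j + 1) else (true, false)
    else pvLoopD s (i' + 1)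
  else (false, false)
termination_by s.length + 1 - i
decreasing_by
  · have := pvFindAny_le s ['\'', '"', '\\'] i; omega
  · have := pvFindAny_le s ['\'', '"', '\\'] i
    have := pvFindAny_le s ['\''] (pvFindAny s ['\'', '"', '\\'] i + 1); omega
  · have := pvFindAny_le s ['\'', '"', '\\'] i; omega

def pvLoopD (s : List Char) (i : Nat) : Bool × Bool :=
  let j := pvFindAny s ['"', '\\'] i
  if h : j < s.length then
    if s[j] = '"' then pvLoopU s (j + 1) else pvLoopD s (j + 2)
  else (false, true)
termination_by s.length + 1 - i
decreasing_by
  · have := pvFindAny_le s ['"', '\\'] i; omega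
  · have := pvFindAny_le s ['"', '\\'] i; omega
end

def scan_quote_state_py_alt (s : String) : Bool × Bool :=
  pvLoopU s.toList 0

-- ===== PRECONDITION & SPEC =====
def Spec_scan_quote_state_py (s : String) (out : Bool × Bool) : Prop := out = scan_quote_state_py_alt s
instance (s : String) (out : Bool × Bool) : Decidable (Spec_scan_quote_state_py s out) := by unfold Spec_scan_quote_state_py; infer_instance

-- ===== CLAIM (what is proved, stated in full; the proofs are below) =====
def Claim_equal_scan_quote_state_py : Prop := ∀ (s : String), Dom_scan_quote_state_py s → Spec_scan_quote_state_py s (scan_quote_state_py s)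

-- ===== LEMMAS AND PROOFS =====

-- Proof-side reference machine: suffix recursion over (in_single, in_double).
def pvScanR : List Char → Bool → Bool → Bool × Bool
  | [], in_single, in_double => (in_single, in_double)
  | ch :: rest, in_single, in_double =>
    if in_single then
      (if ch = '\'' then pvScanR rest false in_double else pvScanR rest true in_double)
    else if ch = '\\' then pvScanR rest.tail in_single in_double
    else if in_double then
      (if ch = '"' then pvScanR rest in_single false else pvScanR rest in_single true)
    else if ch = '\'' then pvScanR rest true in_double
    else if ch = '"' then pvScanR rest in_single true
    else pvScanR rest in_single in_double
termination_by l => l.length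
decreasing_by all_goals (simp [List.length_tail]; try omega)

-- A = reference machine: folding A's step with escape = false agrees with pvScanR,
-- and with escape = true it agrees with pvScanR of the tail.
theorem pvFold_eq_scanR : ∀ (l : List Char) (s1 d : Bool),
    (let st := l.foldl pvStepA (s1, d, false); (st.1, st.2.1)) = pvScanR l s1 d
    ∧ (let st := l.foldl pvStepA (s1, d, true); (st.1, st.2.1)) = pvScanR l.tail s1 d := by
  intro l
  induction l with
  | nil => intro s1 d; simp [pvScanR]
  | cons c rest ih =>
    intro s1 d
    constructor
    · show (let st := List.foldl pvStepA (pvStepA (s1, d, false) c) rest; (st.1, st.2.1)) = _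
      by_cases hs : s1 = true
      · subst hs
        by_cases hc : c = '\''
        · simp [pvStepA, pvScanR, hc, (ih _ _).1]
        · simp [pvStepA, pvScanR, hc, (ih _ _).1]
      · replace hs : s1 = false := by revert hs; cases s1 <;> simp
        subst hs
        by_cases hb : c = '\\'
        · by_cases hd : d = true
          · subst hd
            simp [pvStepA, pvScanR, hb, (ih _ _).2]
          · replace hd : d = false := by revert hd; cases d <;> simp
            subst hd
            simp [pvStepA, pvScanR, hb, (ih _ _).2]
        · by_cases hd : d = true
          · subst hd
            by_cases hc : c = '"'
            · simp [pvStepA, pvScanR, hc, (ih _ _).1]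
            · simp [pvStepA, pvScanR, hb, hc, (ih _ _).1]
          · replace hd : d = false := by revert hd; cases d <;> simp
            subst hd
            by_cases hc : c = '\''
            · simp [pvStepA, pvScanR, hc, (ih _ _).1]
            · by_cases hc2 : c = '"'
              · simp [pvStepA, pvScanR, hc2, (ih _ _).1]
              · simp [pvStepA, pvScanR, hb, hc, hc2, (ih _ _).1]
    · show (let st := List.foldl pvStepA (pvStepA (s1, d, true) c) rest; (st.1, st.2.1)) = _
      simp [pvStepA, (ih s1 d).1]

-- find_any: the result either is len-or-beyond, or points at a char of `chars`
theorem pvFindAny_eq_mem (s chars : List Char) (i j : Nat)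
    (hj : pvFindAny s chars i = j) (h : j < s.length) : s[j] ∈ chars := by
  rw [pvFindAny] at hj
  split at hj
  · split at hj
    · subst hj; assumption
    · exact pvFindAny_eq_mem s chars (i + 1) j hj h
  · omega
termination_by s.length - i

-- skip lemma scheme: pvScanR in a mode is unchanged over the region that
-- _find_any jumps across, provided non-`chars` chars are no-ops in that mode
theorem pvSkip_gen (s chars : List Char) (m1 m2 : Bool)
    (hstep : ∀ (c : Char) (r : List Char), c ∉ chars → pvScanR (c :: r) m1 m2 = pvScanR r m1 m2) :
    ∀ (i : Nat), pvScanR (s.drop (pvFindAny s chars i)) m1 m2 = pvScanR (s.drop i) m1 m2 := by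
  intro i
  rw [pvFindAny]
  split
  · rename_i hlt
    split
    · rfl
    · rename_i hnot
      rw [pvSkip_gen s chars m1 m2 hstep (i + 1)]
      rw [List.drop_eq_getElem_cons hlt, hstep _ _ hnot]
  · rfl
termination_by i => s.length - i

theorem pvSkip_unquoted (s : List Char) (i : Nat) :
    pvScanR (s.drop (pvFindAny s ['\'', '"', '\\'] i)) false false
      = pvScanR (s.drop i) false false := by
  refine pvSkip_gen s _ false false ?_ i
  intro c r hc
  simp only [List.mem_cons, not_or] at hc
  simp [pvScanR, hc.1, hc.2.1, hc.2.2]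

theorem pvSkip_single (s : List Char) (i : Nat) :
    pvScanR (s.drop (pvFindAny s ['\''] i)) true false
      = pvScanR (s.drop i) true false := by
  refine pvSkip_gen s _ true false ?_ i
  intro c r hc
  simp only [List.mem_cons, List.not_mem_nil, or_false] at hc
  simp [pvScanR, hc]

theorem pvSkip_double (s : List Char) (i : Nat) :
    pvScanR (s.drop (pvFindAny s ['"', '\\'] i)) false true
      = pvScanR (s.drop i) false true := by
  refine pvSkip_gen s _ false true ?_ i
  intro c r hc
  simp only [List.mem_cons, not_or] at hc
  simp [pvScanR, hc.1, hc.2]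

-- B = reference machine
theorem pvLoop_eq_scanR (s : List Char) (i : Nat) :
    pvLoopU s i = pvScanR (s.drop i) false false
    ∧ pvLoopD s i = pvScanR (s.drop i) false true := by
  constructor
  · rw [pvLoopU, ← pvSkip_unquoted s i]
    dsimp only
    have hle := pvFindAny_le s ['\'', '"', '\\'] i
    set i' := pvFindAny s ['\'', '"', '\\'] i with hi'
    split
    · rename_i hlt
      have hmem := pvFindAny_eq_mem s ['\'', '"', '\\'] i i' hi'.symm hlt
      rw [List.drop_eq_getElem_cons hlt]
      by_cases hb : s[i'] = '\\'
      · rw [if_pos hb]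
        have := (pvLoop_eq_scanR s (i' + 2)).1
        simp [pvScanR, hb, this, List.tail_drop]
      · rw [if_neg hb]
        by_cases hq : s[i'] = '\''
        · rw [if_pos hq]
          have hle2 := pvFindAny_le s ['\''] (i' + 1)
          have hsk := pvSkip_single s (i' + 1)
          set j := pvFindAny s ['\''] (i' + 1) with hj
          split
          · rename_i hjlt
            have hjm := pvFindAny_eq_mem s ['\''] (i' + 1) j hj.symm hjlt
            simp only [List.mem_cons, List.not_mem_nil, or_false] at hjm
            have := (pvLoop_eq_scanR s (j + 1)).1
            rw [this]
            simp only [pvScanR, hq, if_pos]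
            rw [← hsk, List.drop_eq_getElem_cons hjlt]
            simp [pvScanR, hjm]
          · rename_i hjge
            simp only [pvScanR, hq, if_pos]
            rw [← hsk, List.drop_eq_nil_of_le (show s.length ≤ j by omega)]
            simp [pvScanR]
        · have hd : s[i'] = '"' := by
            simp only [List.mem_cons, List.not_mem_nil, or_false] at hmem
            tauto
          rw [if_neg hq]
          have := (pvLoop_eq_scanR s (i' + 1)).2
          simp [pvScanR, hd, this]
    · rename_i hge
      rw [List.drop_eq_nil_of_le (show s.length ≤ i' by omega)]
      simp [pvScanR]
  · rw [pvLoopD, ← pvSkip_double s i]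
    have hle := pvFindAny_le s ['"', '\\'] i
    set j := pvFindAny s ['"', '\\'] i with hj
    split
    · rename_i hlt
      have hmem := pvFindAny_eq_mem s ['"', '\\'] i j hj.symm hlt
      rw [List.drop_eq_getElem_cons hlt]
      by_cases hq : s[j] = '"'
      · rw [if_pos hq]
        have := (pvLoop_eq_scanR s (j + 1)).1
        simp [pvScanR, hq, this]
      · have hb : s[j] = '\\' := by
          simp only [List.mem_cons, List.not_mem_nil, or_false] at hmem
          tauto
        rw [if_neg hq]
        have := (pvLoop_eq_scanR s (j + 2)).2
        simp [pvScanR, hb, this, List.tail_drop]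
    · rename_i hge
      rw [List.drop_eq_nil_of_le (show s.length ≤ j by omega)]
      simp [pvScanR]
termination_by s.length + 1 - i
decreasing_by
  · have := pvFindAny_le s ['\'', '"', '\\'] i; omega
  · have := pvFindAny_le s ['\'', '"', '\\'] i
    have := pvFindAny_le s ['\''] (pvFindAny s ['\'', '"', '\\'] i + 1); omega
  · have := pvFindAny_le s ['\'', '"', '\\'] i; omega
  · have := pvFindAny_le s ['"', '\\'] i; omega
  · have := pvFindAny_le s ['"', '\\'] i; omega

-- ===== VERDICT (by name: the statement is the Claim_ definition above) =====
theorem scan_quote_state_py_spec : Claim_equal_scan_quote_state_py := by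
  intro s _
  show _ = _
  rw [show scan_quote_state_py s = pvScanR s.toList false false from (pvFold_eq_scanR s.toList false false).1]
  exact ((pvLoop_eq_scanR s.toList 0).1).symm
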